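-- pv_equiv track=rewrite | github.com/manuellafond/cnap | cnvprofiler.py | get_zero_intervals
-- ===== SOURCE A (Python) =====
-- def get_zero_intervals(profile):
--
-- 	intervals = []
-- 	zero_interval_start = -1
-- 	for i in range(len(profile)):
--
-- 		if profile[i] == 0:
-- 			if zero_interval_start == -1:
-- 				zero_interval_start = i
-- 		else:
-- 			if zero_interval_start != -1:
-- 				intervals.append( [zero_interval_start, i - 1] )
-- 				zero_interval_start = -1
--
-- 	if zero_interval_start != -1:
-- 		intervals.append( [zero_interval_start, len(profile) - 1] )
-- 	return intervals
-- ===== SOURCE B (Python) =====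
-- def get_zero_intervals(profile):
--     intervals = []
--     n = len(profile)
--     i = 0
--     while i < n:
--         if profile[i] == 0:
--             j = i
--             while j + 1 < n and profile[j + 1] == 0:
--                 j += 1
--             intervals.append([i, j])
--             i = j + 1
--         else:
--             i += 1
--     return intervals
-- ===== Notes on version B (the rewrite author's own statement) =====
-- stated objective: alternative
-- what changed: Replaces the sentinel-flag state machine with a post-loop flush by a two-pointer run scanner: when a zero is found, an inner scan locates the end of the run and the interval is emitted immediately, so no flag state or trailing append is needed.
import Mathlib
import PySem

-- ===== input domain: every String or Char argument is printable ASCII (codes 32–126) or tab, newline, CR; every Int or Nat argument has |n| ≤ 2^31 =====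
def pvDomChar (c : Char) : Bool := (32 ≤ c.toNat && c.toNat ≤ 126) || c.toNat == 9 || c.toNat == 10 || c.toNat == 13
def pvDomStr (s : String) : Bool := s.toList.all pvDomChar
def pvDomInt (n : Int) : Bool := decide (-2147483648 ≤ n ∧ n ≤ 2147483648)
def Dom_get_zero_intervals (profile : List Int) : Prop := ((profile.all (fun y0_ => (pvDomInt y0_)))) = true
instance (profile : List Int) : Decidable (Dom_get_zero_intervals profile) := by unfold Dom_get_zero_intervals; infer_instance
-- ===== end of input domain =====

-- B replaces A's sentinel-flag state machine (with its post-loop flush) by a two-pointer run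
-- scanner that emits each zero interval as soon as its run ends; return values agree on all inputs.

-- ===== PORT A =====
-- literal port of A: fold over range(len(profile)) carrying (intervals, zero_interval_start),
-- then the post-loop conditional append
def get_zero_intervals (profile : List Int) : List (List Int) :=
  let n : Int := PySem.List.len profile
  let st := (PySem.List.pyRange 0 n 1).foldl
    (fun (s : List (List Int) × Int) i =>
      if PySem.List.pyGetD profile i 0 = 0 then
        if s.2 = -1 then (s.1, i) else s
      else
        if s.2 ≠ -1 then (s.1 ++ [[s.2, i - 1]], -1) else s)
    ([], -1)
  if st.2 ≠ -1 then st.1 ++ [[st.2, n - 1]] else st.1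

-- ===== PORT B =====
-- inner while loop of Source B: j starts at the index of a known zero, advances while the next
-- element is zero; returns the index of the last zero of the run and the unconsumed suffix
def altRun : Int → List Int → Int × List Int
  | j, [] => (j, [])
  | j, x :: xs => if x = 0 then altRun (j + 1) xs else (j, x :: xs)

-- used by altGo's decreasing_by
theorem altRun_len (j : Int) (xs : List Int) : (altRun j xs).2.length ≤ xs.length := by
  induction xs generalizing j with
  | nil => simp [altRun]
  | cons x xs ih =>
    simp only [altRun]
    split
    · exact (ih _).trans (Nat.le_succ _)
    · simp

-- outer while loop of Source B: i is the original index of the head of the remaining suffix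
def altGo : Int → List Int → List (List Int)
  | _, [] => []
  | i, x :: xs =>
    if x = 0 then
      let r := altRun i xs
      [i, r.1] :: altGo (r.1 + 1) r.2
    else altGo (i + 1) xs
termination_by _ l => l.length
decreasing_by
  · exact Nat.lt_succ_of_le (altRun_len i xs)
  · simp

def get_zero_intervals_alt (profile : List Int) : List (List Int) :=
  altGo 0 profile

-- ===== PRECONDITION & SPEC =====
def Spec_get_zero_intervals (profile : List Int) (out : List (List Int)) : Prop := out = get_zero_intervals_alt profile
instance (profile : List Int) (out : List (List Int)) : Decidable (Spec_get_zero_intervals profile out) := by unfold Spec_get_zero_intervals; infer_instance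

-- ===== CLAIM (what is proved, stated in full; the proofs are below) =====
def Claim_equal_get_zero_intervals : Prop := ∀ (profile : List Int), Dom_get_zero_intervals profile → Spec_get_zero_intervals profile (get_zero_intervals profile)

-- ===== LEMMAS AND PROOFS =====

-- A's loop body, on an (index, element) pair
def stepA (s : List (List Int) × Int) (p : Int × Int) : List (List Int) × Int :=
  if p.2 = 0 then
    if s.2 = -1 then (s.1, p.1) else s
  else
    if s.2 ≠ -1 then (s.1 ++ [[s.2, p.1 - 1]], -1) else s

-- A's post-loop flush
def finA (s : List (List Int) × Int) (e : Int) : List (List Int) :=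
  if s.2 ≠ -1 then s.1 ++ [[s.2, e - 1]] else s.1

-- joint loop invariant: outside a zero run (flag = -1) the rest of A's loop produces altGo;
-- inside a run started at z (flag = z ≠ -1) it produces the current interval via altRun, then altGo
theorem invariant (xs : List Int) :
    (∀ (s : Int) acc, 0 ≤ s →
      finA ((PySem.List.enumerate xs s).foldl stepA (acc, -1)) (s + xs.length) = acc ++ altGo s xs) ∧
    (∀ (s z : Int) acc, 0 ≤ s → z ≠ -1 →
      finA ((PySem.List.enumerate xs s).foldl stepA (acc, z)) (s + xs.length) =
        acc ++ ([z, (altRun (s - 1) xs).1] :: altGo ((altRun (s - 1) xs).1 + 1) (altRun (s - 1) xs).2)) := by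
  induction xs with
  | nil =>
    constructor
    · intro s acc _
      simp [PySem.List.enumerate_nil, finA, altGo]
    · intro s z acc _ hz
      simp [PySem.List.enumerate_nil, finA, altRun, altGo, hz]
  | cons x xs ih =>
    obtain ⟨ihOut, ihIn⟩ := ih
    have harith : ∀ s : Int, s + ((x :: xs).length : Int) = (s + 1) + (xs.length : Int) := by
      intro s; simp; omega
    constructor
    · intro s acc hs
      rw [PySem.List.enumerate_cons, List.foldl_cons, harith]
      by_cases hx : x = 0
      · have hstep : stepA (acc, -1) (s, x) = (acc, s) := by simp [stepA, hx]
        have hgo : altGo s (x :: xs) =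
            [s, (altRun s xs).1] :: altGo ((altRun s xs).1 + 1) (altRun s xs).2 := by
          simp only [altGo, if_pos hx]
        rw [hstep, hgo]
        have h := ihIn (s + 1) s acc (by omega) (by omega)
        have h1 : s + 1 - 1 = s := by omega
        rw [h1] at h
        exact h
      · have hstep : stepA (acc, -1) (s, x) = (acc, -1) := by simp [stepA, hx]
        have hgo : altGo s (x :: xs) = altGo (s + 1) xs := by
          simp only [altGo, if_neg hx]
        rw [hstep, hgo]
        exact ihOut (s + 1) acc (by omega)
    · intro s z acc hs hz
      rw [PySem.List.enumerate_cons, List.foldl_cons, harith]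
      by_cases hx : x = 0
      · have hstep : stepA (acc, z) (s, x) = (acc, z) := by simp [stepA, hx, hz]
        have hrun : altRun (s - 1) (x :: xs) = altRun s xs := by
          have : s - 1 + 1 = s := by omega
          simp only [altRun, if_pos hx, this]
        rw [hstep, hrun]
        have h := ihIn (s + 1) z acc (by omega) hz
        have h1 : s + 1 - 1 = s := by omega
        rw [h1] at h
        exact h
      · have hstep : stepA (acc, z) (s, x) = (acc ++ [[z, s - 1]], -1) := by
          simp [stepA, hx, hz]
        have hrun : altRun (s - 1) (x :: xs) = (s - 1, x :: xs) := by
          simp only [altRun, if_neg hx]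
        rw [hstep, hrun]
        have h := ihOut (s + 1) (acc ++ [[z, s - 1]]) (by omega)
        rw [h]
        have hgo : altGo s (x :: xs) = altGo (s + 1) xs := by
          simp only [altGo, if_neg hx]
        simp [hgo]

-- ===== VERDICT (by name: the statement is the Claim_ definition above) =====
theorem get_zero_intervals_spec : Claim_equal_get_zero_intervals := by
  intro profile _
  show get_zero_intervals profile = get_zero_intervals_alt profile
  unfold get_zero_intervals get_zero_intervals_alt
  have henum := PySem.List.enumerate_eq_map_pyRange (xs := profile) (d := 0)
  have hfold :
      (PySem.List.pyRange 0 (PySem.List.len profile) 1).foldl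
        (fun (s : List (List Int) × Int) i =>
          if PySem.List.pyGetD profile i 0 = 0 then
            if s.2 = -1 then (s.1, i) else s
          else
            if s.2 ≠ -1 then (s.1 ++ [[s.2, i - 1]], -1) else s)
        ([], -1)
      = (PySem.List.enumerate profile 0).foldl stepA ([], -1) := by
    rw [henum, List.foldl_map]
    rfl
  have hmain := (invariant profile).1 0 [] le_rfl
  simp only at hmain
  rw [zero_add] at hmain
  show finA _ _ = _
  rw [hfold]
  have hlen : PySem.List.len profile = (profile.length : Int) := by
    simp [PySem.List.len_eq]
  rw [hlen]
  exact hmain
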